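-- pv_equiv track=rewrite | github.com/Sairam22BCI0289/ISMS- | backend/app/reporting/generate_report_figures.py | grouped_counts
-- ===== SOURCE A (Python) =====
-- from collections import Counter, defaultdict
-- from typing import Any, Callable
--
-- SOURCES = ["host", "network", "cloud"]
--
-- def source_of(event: dict[str, Any]) -> str:
--     source = str(event.get("source") or "unknown").strip().lower()
--     return source if source else "unknown"
--
-- def grouped_counts(events: list[dict[str, Any]], field: str, labels: list[str]) -> dict[str, Counter]:
--     counters: dict[str, Counter] = {source: Counter() for source in SOURCES}
--     for event in events:
--         source = source_of(event)
--         if source not in counters: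
--             continue
--         value = event.get(field)
--         label = str(value).strip() if value not in (None, "") else "not recorded"
--         if label in labels:
--             counters[source][label] += 1
--     return counters
-- ===== SOURCE B (Python) =====
-- from collections import Counter
--
-- SOURCES = ["host", "network", "cloud"]
--
-- def source_of(event):
--     source = str(event.get("source") or "unknown").strip().lower()
--     return source if source else "unknown"
--
-- def grouped_counts(events, field, labels):
--     def label_of(event):
--         value = event.get(field)
--         return str(value).strip() if value not in (None, "") else "not recorded"
--     return {
--         source: Counter(
--             label
--             for event in events
--             if source_of(event) == source and (label := label_of(event)) in labels
--         )
--         for source in SOURCES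
--     }
-- ===== Notes on version B (the rewrite author's own statement) =====
-- stated objective: idiomatic
-- what changed: B replaces A's single imperative loop that increments into a pre-built nested dict with a dict comprehension over SOURCES, building each source's Counter in one idiomatic Counter(generator) call over the events filtered to that source.
import Mathlib
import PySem

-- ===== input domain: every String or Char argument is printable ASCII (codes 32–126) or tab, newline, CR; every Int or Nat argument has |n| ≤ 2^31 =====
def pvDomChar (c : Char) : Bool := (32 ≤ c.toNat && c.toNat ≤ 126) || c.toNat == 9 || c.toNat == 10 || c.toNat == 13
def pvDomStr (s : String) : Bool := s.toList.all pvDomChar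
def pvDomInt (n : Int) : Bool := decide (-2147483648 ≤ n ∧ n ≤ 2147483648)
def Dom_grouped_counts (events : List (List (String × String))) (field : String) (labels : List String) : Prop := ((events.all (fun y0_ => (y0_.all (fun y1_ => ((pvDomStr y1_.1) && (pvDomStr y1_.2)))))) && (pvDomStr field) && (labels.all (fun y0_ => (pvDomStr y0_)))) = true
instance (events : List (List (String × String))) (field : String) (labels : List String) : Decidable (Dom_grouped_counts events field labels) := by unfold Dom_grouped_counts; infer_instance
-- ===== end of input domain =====

-- B builds each source's Counter with one Counter(generator) per source (a dict comprehension over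
-- SOURCES) instead of A's single loop incrementing into a pre-built nested dict; objective: idiomatic.

-- ===== PORT A =====
def pvSOURCES : List String := ["host", "network", "cloud"]

-- shared module-level helper source_of (used by both A and B)
def pvSourceOf (event : List (String × String)) : String :=
  let raw : String := match (PySem.Dict.mk event).get? "source" with
    | none => "unknown"
    | some v => if v = "" then "unknown" else v
  let source := PySem.Str.lower (PySem.Str.strip raw)
  if source = "" then "unknown" else source

def grouped_counts (events : List (List (String × String))) (field : String) (labels : List String) : List (String × List (String × Int)) :=
  let counters : PySem.Dict String (PySem.Dict String Int) :=
    pvSOURCES.foldl (fun d s => d.insert s PySem.Dict.empty) PySem.Dict.empty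
  let final := events.foldl (fun counters event =>
    let source := pvSourceOf event
    if counters.contains source then
      let value := (PySem.Dict.mk event).get? field
      let label : String := match value with
        | none => "not recorded"
        | some v => if v = "" then "not recorded" else PySem.Str.strip v
      if labels.contains label then
        counters.modify source PySem.Dict.empty (fun c => c.modify label 0 (· + 1))
      else counters
    else counters) counters
  final.items.map (fun p => (p.1, p.2.items))

-- ===== PORT B =====
def pvLabelOf (event : List (String × String)) (field : String) : String :=
  match (PySem.Dict.mk event).get? field with
  | none => "not recorded"
  | some v => if v = "" then "not recorded" else PySem.Str.strip v

def grouped_counts_alt (events : List (List (String × String))) (field : String) (labels : List String) : List (String × List (String × Int)) :=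
  pvSOURCES.map (fun source =>
    (source, (PySem.Dict.counter
      ((events.filter (fun e => pvSourceOf e == source && labels.contains (pvLabelOf e field))).map
        (fun e => pvLabelOf e field))).items))

-- ===== PRECONDITION & SPEC =====
def Spec_grouped_counts (events : List (List (String × String))) (field : String) (labels : List String) (out : List (String × List (String × Int))) : Prop := out = grouped_counts_alt events field labels
instance (events : List (List (String × String))) (field : String) (labels : List String) (out : List (String × List (String × Int))) : Decidable (Spec_grouped_counts events field labels out) := by unfold Spec_grouped_counts; infer_instance

-- ===== CLAIM (what is proved, stated in full; the proofs are below) =====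
def Claim_equal_grouped_counts : Prop := ∀ (events : List (List (String × String))) (field : String) (labels : List String), Dom_grouped_counts events field labels → Spec_grouped_counts events field labels (grouped_counts events field labels)

-- ===== LEMMAS AND PROOFS =====

-- A's loop body, named for the proofs
def pvStepA (field : String) (labels : List String) (counters : PySem.Dict String (PySem.Dict String Int)) (event : List (String × String)) : PySem.Dict String (PySem.Dict String Int) :=
  let source := pvSourceOf event
  if counters.contains source then
    let value := (PySem.Dict.mk event).get? field
    let label : String := match value with
      | none => "not recorded"
      | some v => if v = "" then "not recorded" else PySem.Str.strip v
    if labels.contains label then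
      counters.modify source PySem.Dict.empty (fun c => c.modify label 0 (· + 1))
    else counters
  else counters

-- B's per-source loop body
def pvStepB (field : String) (labels : List String) (s : String) (c : PySem.Dict String Int) (e : List (String × String)) : PySem.Dict String Int :=
  if pvSourceOf e == s && labels.contains (pvLabelOf e field) then
    c.modify (pvLabelOf e field) 0 (· + 1)
  else c

theorem pvStepA_eq (field : String) (labels : List String)
    (ch cn cc : PySem.Dict String Int) (e : List (String × String)) :
    pvStepA field labels (PySem.Dict.mk [("host", ch), ("network", cn), ("cloud", cc)]) e =
      PySem.Dict.mk [("host", pvStepB field labels "host" ch e),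
                     ("network", pvStepB field labels "network" cn e),
                     ("cloud", pvStepB field labels "cloud" cc e)] := by
  show (let source := pvSourceOf e
        if (PySem.Dict.mk [("host", ch), ("network", cn), ("cloud", cc)]).contains source then
          let lab := pvLabelOf e field
          if labels.contains lab then
            (PySem.Dict.mk [("host", ch), ("network", cn), ("cloud", cc)]).modify source
              PySem.Dict.empty (fun c => c.modify lab 0 (· + 1))
          else PySem.Dict.mk [("host", ch), ("network", cn), ("cloud", cc)]
        else PySem.Dict.mk [("host", ch), ("network", cn), ("cloud", cc)]) = _
  simp only [pvStepB]
  generalize pvLabelOf e field = lab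
  generalize pvSourceOf e = s
  by_cases h1 : s = "host"
  · subst h1
    simp [PySem.Dict.contains, PySem.Dict.modify, PySem.Dict.insert,
        PySem.Dict.getD, PySem.Dict.get?, List.find?_cons]
    split_ifs <;> rfl
  · by_cases h2 : s = "network"
    · subst h2
      simp [PySem.Dict.contains, PySem.Dict.modify, PySem.Dict.insert,
          PySem.Dict.getD, PySem.Dict.get?, List.find?_cons]
      split_ifs <;> rfl
    · by_cases h3 : s = "cloud"
      · subst h3
        simp [PySem.Dict.contains, PySem.Dict.modify, PySem.Dict.insert,
            PySem.Dict.getD, PySem.Dict.get?, List.find?_cons]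
        split_ifs <;> rfl
      · have n1 : ("host" : String) ≠ s := fun h => h1 h.symm
        have n2 : ("network" : String) ≠ s := fun h => h2 h.symm
        have n3 : ("cloud" : String) ≠ s := fun h => h3 h.symm
        simp [PySem.Dict.contains, beq_iff_eq, n1, n2, n3, h1, h2, h3]

theorem pv_loop_eq (field : String) (labels : List String) :
    ∀ (events : List (List (String × String))) (ch cn cc : PySem.Dict String Int),
    events.foldl (pvStepA field labels) (PySem.Dict.mk [("host", ch), ("network", cn), ("cloud", cc)]) =
      PySem.Dict.mk [("host", events.foldl (pvStepB field labels "host") ch),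
                     ("network", events.foldl (pvStepB field labels "network") cn),
                     ("cloud", events.foldl (pvStepB field labels "cloud") cc)] := by
  intro events
  induction events with
  | nil => intro ch cn cc; rfl
  | cons e rest ih =>
      intro ch cn cc
      simp only [List.foldl_cons, pvStepA_eq]
      exact ih _ _ _

theorem pv_foldl_filter_map {α β γ : Type} (p : α → Bool) (g : α → β) (step : γ → β → γ) :
    ∀ (l : List α) (c : γ),
    ((l.filter p).map g).foldl step c = l.foldl (fun c a => if p a then step c (g a) else c) c := by
  intro l
  induction l with
  | nil => intro c; rfl
  | cons a rest ih =>
      intro c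
      by_cases h : p a = true <;> simp [h, ih]

theorem pv_tally_eq (field : String) (labels : List String) (s : String)
    (events : List (List (String × String))) :
    PySem.Dict.counter
        ((events.filter (fun e => pvSourceOf e == s && labels.contains (pvLabelOf e field))).map
          (fun e => pvLabelOf e field)) =
      events.foldl (pvStepB field labels s) PySem.Dict.empty := by
  rw [PySem.Dict.counter]
  exact pv_foldl_filter_map (γ := PySem.Dict String Int) (fun e => pvSourceOf e == s && labels.contains (pvLabelOf e field))
      (fun e => pvLabelOf e field) (fun d x => d.modify x 0 (· + 1)) events PySem.Dict.empty

-- ===== VERDICT (by name: the statement is the Claim_ definition above) =====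
theorem grouped_counts_spec : Claim_equal_grouped_counts := by
  intro events field labels _
  show grouped_counts events field labels = grouped_counts_alt events field labels
  have hinit : pvSOURCES.foldl (fun d s => d.insert s (PySem.Dict.empty : PySem.Dict String Int)) PySem.Dict.empty =
      PySem.Dict.mk [("host", PySem.Dict.empty), ("network", PySem.Dict.empty), ("cloud", PySem.Dict.empty)] := by
    decide
  have hA : grouped_counts events field labels =
      (events.foldl (pvStepA field labels)
        (PySem.Dict.mk [("host", PySem.Dict.empty), ("network", PySem.Dict.empty), ("cloud", PySem.Dict.empty)])).items.map
        (fun p => (p.1, p.2.items)) := by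
    simp only [grouped_counts, hinit]; rfl
  rw [hA, pv_loop_eq]
  simp only [grouped_counts_alt, pvSOURCES, List.map_cons, List.map_nil, pv_tally_eq]
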